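-- pv_equiv track=rewrite | github.com/OmarElawady/pless | pless/pgn.py | parse_pgn
-- ===== SOURCE A (Python) =====
-- def eliminate_comments(pgn_defintion):
--     res = ""
--     in_comment = False
--     comment_type = ";"
--     for c in pgn_defintion:
--         if in_comment:
--             if comment_type == ";" and c == "\n":
--                 if c == "\n":
--                     res += "\n"
--                 in_comment = False
--             elif comment_type == "{" and c == "}":
--                 in_comment = False
--         else:
--             if c == "{":
--                 in_comment = True
--                 comment_type = "{"
--             elif c == ";":
--                 in_comment = True
--                 comment_type = ";"
--             else:
--                 res += c
--     return res
--
-- def extract_moves(pgn_defintion):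
--     without_comments = eliminate_comments(pgn_defintion)
--     moves = without_comments.replace("\n", " ").split(" ")
--     result = []
--     for e in moves:
--         if e and not e[0].isdigit():
--             result.append(e)
--     return result
--
-- def parse_pgn(game_description):
--     pgn_defintion = ""
--     for line in game_description.split("\n"):
--         if not line or line[0] == "[":
--             continue
--         else:
--             pgn_defintion += line + "\n"
--
--     moves = extract_moves(pgn_defintion)
--     return moves
-- ===== SOURCE B (Python) =====
-- def parse_pgn(game_description):
--     # single-pass scanner over the header-filtered text (no intermediate comment-free string)
--     text = "".join(line + "\n" for line in game_description.split("\n")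
--                    if line and not line.startswith("["))
--     moves = []
--     token = []
--     in_comment = False
--     comment_type = ";"
--     for c in text:
--         if in_comment:
--             if comment_type == ";" and c == "\n":
--                 in_comment = False
--                 if token and not token[0].isdigit():
--                     moves.append("".join(token))
--                 token = []
--             elif comment_type == "{" and c == "}":
--                 in_comment = False
--         else:
--             if c == "{":
--                 in_comment = True
--                 comment_type = "{"
--             elif c == ";":
--                 in_comment = True
--                 comment_type = ";"
--             elif c == " " or c == "\n":
--                 if token and not token[0].isdigit():
--                     moves.append("".join(token))
--                 token = []
--             else:
--                 token.append(c)
--     if token and not token[0].isdigit():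
--         moves.append("".join(token))
--     return moves
-- ===== Notes on version B (the rewrite author's own statement) =====
-- stated objective: alternative
-- what changed: A builds a comment-free string, replaces newlines, splits and filters in separate passes; B scans the header-filtered text once with a comment-state flag and a token buffer, emitting tokens directly.
import Mathlib
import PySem

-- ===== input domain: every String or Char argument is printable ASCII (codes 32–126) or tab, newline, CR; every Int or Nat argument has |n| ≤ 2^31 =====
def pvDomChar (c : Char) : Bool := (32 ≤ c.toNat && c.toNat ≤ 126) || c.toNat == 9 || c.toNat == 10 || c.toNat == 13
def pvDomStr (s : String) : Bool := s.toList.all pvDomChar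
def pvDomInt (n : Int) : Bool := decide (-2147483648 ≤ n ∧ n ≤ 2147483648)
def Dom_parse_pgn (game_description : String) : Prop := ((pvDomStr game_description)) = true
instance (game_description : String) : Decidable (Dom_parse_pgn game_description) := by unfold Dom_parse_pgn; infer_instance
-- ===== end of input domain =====

-- B replaces A's three string passes (eliminate comments, replace newlines, split+filter)
-- by one character scan with a token buffer; objective: alternative decomposition (same cost).

-- shared tiny helpers, exact for the Python they port on the ASCII domain:
-- split on one separator char = Python str.split(sep) for a 1-char sep ("" splits to [""])
def splitCh (sep : Char) : List Char → List (List Char)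
  | [] => [[]]
  | c :: cs =>
    match splitCh sep cs with
    | t :: ts => if c = sep then [] :: t :: ts else (c :: t) :: ts
    | [] => []
-- token keep-test: `e and not e[0].isdigit()` (exact for ASCII chars, the stated domain)
def okTok (e : List Char) : Bool := !e.isEmpty && !(e.headD ' ' |>.isDigit)

-- ===== PORT A =====
-- eliminate_comments, as the state machine over the characters
def elimGo (inC : Bool) (ct : Char) : List Char → List Char
  | [] => []
  | c :: cs =>
    if inC then
      if ct = ';' ∧ c = '\n' then '\n' :: elimGo false ct cs
      else if ct = '{' ∧ c = '}' then elimGo false ct cs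
      else elimGo inC ct cs
    else
      if c = '{' then elimGo true '{' cs
      else if c = ';' then elimGo true ';' cs
      else c :: elimGo false ct cs

def eliminate_comments (l : List Char) : List Char := elimGo false ';' l

def extract_moves (l : List Char) : List (List Char) :=
  let without_comments := eliminate_comments l
  let moves := splitCh ' ' (without_comments.map (fun c => if c = '\n' then ' ' else c))
  moves.filter okTok

def parse_pgn (game_description : String) : List String :=
  let lines := splitCh '\n' game_description.toList
  let pgn := lines.foldl (fun acc line =>
    if line.isEmpty || line.headD ' ' = '[' then acc else acc ++ line ++ ['\n']) []
  (extract_moves pgn).map String.ofList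

-- ===== PORT B =====
-- single scan: comment state + current token buffer + accumulated moves
def scanGo (inC : Bool) (ct : Char) (buf : List Char) (acc : List (List Char)) :
    List Char → List (List Char)
  | [] => acc ++ (if okTok buf then [buf] else [])
  | c :: cs =>
    if inC then
      if ct = ';' ∧ c = '\n' then
        scanGo false ct [] (acc ++ (if okTok buf then [buf] else [])) cs
      else if ct = '{' ∧ c = '}' then scanGo false ct buf acc cs
      else scanGo inC ct buf acc cs
    else
      if c = '{' then scanGo true '{' buf acc cs
      else if c = ';' then scanGo true ';' buf acc cs
      else if c = ' ' ∨ c = '\n' then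
        scanGo false ct [] (acc ++ (if okTok buf then [buf] else [])) cs
      else scanGo false ct (buf ++ [c]) acc cs

def parse_pgn_alt (game_description : String) : List String :=
  let text := ((splitCh '\n' game_description.toList).filter
      (fun l => !l.isEmpty && l.headD ' ' ≠ '[')).flatMap (fun l => l ++ ['\n'])
  (scanGo false ';' [] [] text).map String.ofList

-- ===== PRECONDITION & SPEC =====
def Spec_parse_pgn (game_description : String) (out : List String) : Prop := out = parse_pgn_alt game_description
instance (game_description : String) (out : List String) : Decidable (Spec_parse_pgn game_description out) := by unfold Spec_parse_pgn; infer_instance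

-- ===== CLAIM (what is proved, stated in full; the proofs are below) =====
def Claim_equal_parse_pgn : Prop := ∀ (game_description : String), Dom_parse_pgn game_description → Spec_parse_pgn game_description (parse_pgn game_description)

-- ===== LEMMAS AND PROOFS =====

-- split on ' ' or '\n' at once (= splitting on ' ' after mapping '\n' to ' ')
def splitWs : List Char → List (List Char)
  | [] => [[]]
  | c :: cs =>
    match splitWs cs with
    | t :: ts => if c = ' ' ∨ c = '\n' then [] :: t :: ts else (c :: t) :: ts
    | [] => []

theorem splitWs_ne_nil (l : List Char) : splitWs l ≠ [] := by
  induction l with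
  | nil => simp [splitWs]
  | cons c cs ih =>
    rcases h : splitWs cs with _ | ⟨t, ts⟩
    · exact absurd h ih
    · simp only [splitWs, h]
      split <;> simp

theorem splitWs_cons (c : Char) (cs : List Char) {t : List Char} {ts : List (List Char)}
    (h : splitWs cs = t :: ts) :
    splitWs (c :: cs) = if c = ' ' ∨ c = '\n' then [] :: t :: ts else (c :: t) :: ts := by
  rw [splitWs, h]

theorem splitCh_map_eq_splitWs (l : List Char) :
    splitCh ' ' (l.map (fun c => if c = '\n' then ' ' else c)) = splitWs l := by
  induction l with
  | nil => rfl
  | cons c cs ih =>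
    simp only [List.map, splitCh, splitWs, ih]
    rcases h : splitWs cs with _ | ⟨t, ts⟩
    · exact absurd h (splitWs_ne_nil cs)
    · by_cases hc : c = '\n'
      · simp [hc]
      · by_cases hs : c = ' ' <;> simp [hc, hs]

-- prepend buf to the first token
def consFirst (buf : List Char) : List (List Char) → List (List Char)
  | [] => []
  | t :: ts => (buf ++ t) :: ts

-- the scan invariant: B's scan equals A's "eliminate, split, filter" pipeline
theorem scanGo_eq (l : List Char) : ∀ (inC : Bool) (ct : Char) (buf : List Char)
    (acc : List (List Char)),
    scanGo inC ct buf acc l = acc ++ (consFirst buf (splitWs (elimGo inC ct l))).filter okTok := by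
  induction l with
  | nil =>
    intro inC ct buf acc
    simp only [scanGo, elimGo, splitWs, consFirst, List.append_nil, List.filter]
    split <;> simp_all
  | cons c cs ih =>
    intro inC ct buf acc
    simp only [scanGo, elimGo]
    by_cases hic : inC = true
    · subst hic
      rw [if_pos rfl, if_pos rfl]
      by_cases h1 : ct = ';' ∧ c = '\n'
      · obtain ⟨hct, hc⟩ := h1; subst hct; subst hc
        rw [if_pos (And.intro rfl rfl), if_pos (And.intro rfl rfl), ih]
        rcases h : splitWs (elimGo false ';' cs) with _ | ⟨t, ts⟩
        · exact absurd h (splitWs_ne_nil _)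
        · rw [splitWs_cons _ _ h, if_pos (Or.inr rfl)]
          simp [consFirst, List.filter_cons, List.append_assoc]
          split <;> simp
      · rw [if_neg h1, if_neg h1]
        by_cases h2 : ct = '{' ∧ c = '}'
        · rw [if_pos h2, if_pos h2, ih]
        · rw [if_neg h2, if_neg h2, ih]
    · simp only [Bool.not_eq_true] at hic; subst hic
      rw [if_neg Bool.false_ne_true, if_neg Bool.false_ne_true]
      by_cases h1 : c = '{'
      · subst h1; rw [if_pos rfl, if_pos rfl, ih]
      · rw [if_neg h1, if_neg h1]
        by_cases h2 : c = ';'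
        · subst h2; rw [if_pos rfl, if_pos rfl, ih]
        · rw [if_neg h2, if_neg h2]
          by_cases h3 : c = ' ' ∨ c = '\n'
          · rw [if_pos h3, ih]
            rcases h : splitWs (elimGo false ct cs) with _ | ⟨t, ts⟩
            · exact absurd h (splitWs_ne_nil _)
            · rw [splitWs_cons _ _ h, if_pos h3]
              simp [consFirst, List.filter_cons, List.append_assoc]
              split <;> simp
          · rw [if_neg h3, ih]
            rcases h : splitWs (elimGo false ct cs) with _ | ⟨t, ts⟩
            · exact absurd h (splitWs_ne_nil _)
            · rw [splitWs_cons _ _ h, if_neg h3]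
              simp [consFirst, List.append_assoc]

-- stage 1: A's foldl over the lines equals B's filter + flatMap
theorem foldl_lines (ls : List (List Char)) : ∀ (acc : List Char),
    ls.foldl (fun acc line =>
      if line.isEmpty || line.headD ' ' = '[' then acc else acc ++ line ++ ['\n']) acc
    = acc ++ (ls.filter (fun l => !l.isEmpty && l.headD ' ' ≠ '[')).flatMap
        (fun l => l ++ ['\n']) := by
  induction ls with
  | nil => simp
  | cons l ls ih =>
    intro acc
    rw [List.foldl_cons, List.filter_cons]
    by_cases h1 : l.isEmpty = true
    · rw [if_pos (by simp [h1]), ih, if_neg (by simp [h1])]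
    · by_cases h2 : l.headD ' ' = '['
      · rw [if_pos (by cases l <;> simp_all [List.headD]), ih, if_neg (by cases l <;> simp_all [List.headD])]
      · rw [if_neg (by cases l <;> simp_all [List.headD]), ih, if_pos (by cases l <;> simp_all [List.headD])]
        simp

-- ===== VERDICT (by name: the statement is the Claim_ definition above) =====
theorem parse_pgn_spec : Claim_equal_parse_pgn := by
  intro s _
  simp only [Spec_parse_pgn, parse_pgn, parse_pgn_alt, extract_moves, eliminate_comments]
  rw [foldl_lines, scanGo_eq, List.nil_append, List.nil_append, splitCh_map_eq_splitWs]
  rcases h : splitWs (elimGo false ';' (List.flatMap (fun l => l ++ ['\n'])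
      ((splitCh '\n' s.toList).filter (fun l => !l.isEmpty && l.headD ' ' ≠ '[')))) with _ | ⟨t, ts⟩
  · exact absurd h (splitWs_ne_nil _)
  · simp [consFirst]
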